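-- pv_equiv track=rewrite | github.com/jangchangwan/TIL | docs/08_programmers/징검다리 건너기/s2.py | checkstone
-- ===== SOURCE A (Python) =====
-- def checkstone(man, stones, power):  # 징검다리 건널 수 있는지 체크하는 함수
--     # 현재 위치
--     now = -1
--     # 다음 건널 돌
--     next = 0
--     while next < len(stones):
--         # 건너갈 수 있는 경우
--         if stones[next] >= man:
--             #
--             now = next
--             next += 1
--         # 건너갈순있지만 뛰어넘아야되는 경우
--         else:
--             next += 1
--         # 건널 수 없는 경우
--         if next - now > power:
--             return False
--     return True
-- ===== SOURCE B (Python) =====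
-- def checkstone(man, stones, power):
--     # Staged decomposition: collect the positions of safe stones (s >= man)
--     # between sentinels -1 (start bank) and len(stones) (far bank), then the
--     # crossing exists iff every adjacent gap in that position list is <= power.
--     if not stones:
--         return True
--     pos = [-1] + [i for i, s in enumerate(stones) if s >= man] + [len(stones)]
--     return all(q - p <= power for p, q in zip(pos, pos[1:]))
-- ===== Notes on version B (the rewrite author's own statement) =====
-- stated objective: alternative
-- what changed: Replaces A's early-returning index/while scan tracking the last safe position with staged passes: build the list of safe-stone positions bracketed by bank sentinels -1 and len(stones), then check that every adjacent gap in that list is at most power.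
import Mathlib
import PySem

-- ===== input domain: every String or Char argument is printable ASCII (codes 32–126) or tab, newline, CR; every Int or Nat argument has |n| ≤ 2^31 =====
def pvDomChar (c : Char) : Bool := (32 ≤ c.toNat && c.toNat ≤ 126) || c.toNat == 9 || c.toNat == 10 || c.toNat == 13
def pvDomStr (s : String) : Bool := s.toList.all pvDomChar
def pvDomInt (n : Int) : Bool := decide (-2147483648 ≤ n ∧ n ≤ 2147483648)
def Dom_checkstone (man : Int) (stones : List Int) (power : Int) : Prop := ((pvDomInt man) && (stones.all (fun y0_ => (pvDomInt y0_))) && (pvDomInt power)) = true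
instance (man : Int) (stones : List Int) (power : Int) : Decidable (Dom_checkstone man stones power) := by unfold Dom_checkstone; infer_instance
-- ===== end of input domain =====

-- B replaces A's early-returning while scan with staged passes: the list of safe-stone
-- positions between bank sentinels, then an all-adjacent-gaps-≤-power check; objective: alternative.


-- ===== PORT A =====
-- literal transliteration of A's while loop: now = last crossable index, next = index to try
def checkstoneGo (man : Int) (stones : List Int) (power : Int) (now : Int) (next : Nat) : Bool :=
  if h : next < stones.length then
    if stones[next] ≥ man then
      let now' : Int := (next : Int)
      let next' : Nat := next + 1
      if (next' : Int) - now' > power then false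
      else checkstoneGo man stones power now' next'
    else
      let next' : Nat := next + 1
      if (next' : Int) - now > power then false
      else checkstoneGo man stones power now next'
  else true
termination_by stones.length - next

def checkstone (man : Int) (stones : List Int) (power : Int) : Bool :=
  checkstoneGo man stones power (-1) 0

-- ===== PORT B =====
-- Source B: pos = [-1] + [i for i, s in enumerate(stones) if s >= man] + [len(stones)];
--       all(q - p <= power for p, q in zip(pos, pos[1:]))
def checkstone_alt (man : Int) (stones : List Int) (power : Int) : Bool :=
  if stones.isEmpty then true
  else
    let pos : List Int :=
      [-1] ++ ((PySem.List.enumerate stones).filter (fun p => p.2 ≥ man)).map (fun p => p.1)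
           ++ [(stones.length : Int)]
    (pos.zip pos.tail).all (fun pq => decide (pq.2 - pq.1 ≤ power))

-- ===== PRECONDITION & SPEC =====
def Spec_checkstone (man : Int) (stones : List Int) (power : Int) (out : Bool) : Prop := out = checkstone_alt man stones power
instance (man : Int) (stones : List Int) (power : Int) (out : Bool) : Decidable (Spec_checkstone man stones power out) := by unfold Spec_checkstone; infer_instance

-- ===== CLAIM (what is proved, stated in full; the proofs are below) =====
def Claim_equal_checkstone : Prop := ∀ (man : Int) (stones : List Int) (power : Int), Dom_checkstone man stones power → Spec_checkstone man stones power (checkstone man stones power)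

-- ===== LEMMAS AND PROOFS =====

-- A's loop re-expressed as structural recursion over the remaining stones,
-- carrying run = length of the current trailing sunk run
def gB (man power : Int) : Int → List Int → Bool
  | _, [] => true
  | run, s :: t =>
    let run' := if s < man then run + 1 else 0
    if run' + 1 > power then false else gB man power run' t

theorem go_eq_gB (man power : Int) (stones : List Int) :
    ∀ (k next : Nat) (now : Int), stones.length ≤ next + k →
      checkstoneGo man stones power now next
        = gB man power ((next : Int) - 1 - now) (stones.drop next) := by
  intro k
  induction k with
  | zero =>
    intro next now h
    rw [checkstoneGo]
    rw [dif_neg (by omega)]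
    rw [List.drop_eq_nil_of_le (by omega)]
    rfl
  | succ k ih =>
    intro next now h
    rw [checkstoneGo]
    by_cases hn : next < stones.length
    · rw [dif_pos hn]
      rw [List.drop_eq_getElem_cons hn]
      show _ = gB man power _ _
      rw [gB]
      by_cases hs : stones[next] ≥ man
      · rw [if_pos hs, if_neg (by omega : ¬ stones[next] < man)]
        simp only []
        have h1 : checkstoneGo man stones power (next : Int) (next + 1)
            = gB man power (((next : Nat) + 1 : Int) - 1 - (next : Int)) (stones.drop (next + 1)) := by
          have := ih (next + 1) ((next : Int)) (by omega)
          simpa using this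
        by_cases hp : ((next + 1 : Nat) : Int) - (next : Int) > power
        · rw [if_pos hp, if_pos (by push_cast at hp ⊢; omega)]
        · rw [if_neg hp, if_neg (by push_cast at hp ⊢; omega), h1]
          congr 1
          ring
      · rw [if_neg hs, if_pos (by omega : stones[next] < man)]
        simp only []
        have h1 := ih (next + 1) now (by omega)
        by_cases hp : ((next + 1 : Nat) : Int) - now > power
        · rw [if_pos hp, if_pos (by push_cast at hp ⊢; omega)]
        · rw [if_neg hp, if_neg (by push_cast at hp ⊢; omega), h1]
          congr 1
          push_cast
          ring
    · rw [dif_neg hn]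
      rw [List.drop_eq_nil_of_le (by omega)]
      rfl

-- B's check re-expressed as recursion: prev = position of last safe stone (or -1),
-- i = index of the head of the remaining list; checks the gap at each safe stone
-- and the final gap to the far bank
def hB (man power : Int) : Int → Int → List Int → Bool
  | prev, i, [] => decide (i - prev ≤ power)
  | prev, i, s :: t =>
    if s ≥ man then decide (i - prev ≤ power) && hB man power i (i + 1) t
    else hB man power prev (i + 1) t

-- safe-stone positions of the remaining list, indexed from i
def safeIdx (man : Int) : Int → List Int → List Int
  | _, [] => []
  | i, s :: t => if s ≥ man then i :: safeIdx man (i + 1) t else safeIdx man (i + 1) t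

-- adjacent-gaps check, the zip/all of Source B
def allAdj (power : Int) (xs : List Int) : Bool :=
  (xs.zip xs.tail).all (fun pq => decide (pq.2 - pq.1 ≤ power))

theorem filter_enumerate_eq_safeIdx (man : Int) (l : List Int) :
    ∀ i : Int, ((PySem.List.enumerate l i).filter (fun p => p.2 ≥ man)).map (fun p => p.1)
      = safeIdx man i l := by
  induction l with
  | nil => intro i; simp [PySem.List.enumerate_nil, safeIdx]
  | cons s t ih =>
    intro i
    rw [PySem.List.enumerate_cons, safeIdx]
    by_cases hs : s ≥ man
    · simp [hs, ih]
    · simp [hs, ih]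

theorem allAdj_cons (power a b : Int) (rest : List Int) :
    allAdj power (a :: b :: rest) = (decide (b - a ≤ power) && allAdj power (b :: rest)) := by
  simp [allAdj]

theorem allAdj_eq_hB (man power : Int) (l : List Int) :
    ∀ (i prev : Int),
      allAdj power (prev :: (safeIdx man i l ++ [i + l.length])) = hB man power prev i l := by
  induction l with
  | nil => intro i prev; simp [safeIdx, allAdj, hB]
  | cons s t ih =>
    intro i prev
    rw [hB, safeIdx]
    have hlen : i + ((s :: t).length : Int) = (i + 1) + (t.length : Int) := by
      simp; ring
    rw [hlen]
    by_cases hs : s ≥ man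
    · rw [if_pos hs, if_pos hs]
      rw [List.cons_append, allAdj_cons, ih (i + 1) i]
    · rw [if_neg hs, if_neg hs]
      exact ih (i + 1) prev

theorem hB_false (man power : Int) (l : List Int) :
    ∀ (i prev : Int), i - prev > power → hB man power prev i l = false := by
  induction l with
  | nil => intro i prev h; simp [hB]; omega
  | cons s t ih =>
    intro i prev h
    rw [hB]
    by_cases hs : s ≥ man
    · rw [if_pos hs]
      simp [show ¬ (i - prev ≤ power) by omega]
    · rw [if_neg hs]
      exact ih (i + 1) prev (by omega)

theorem gB_eq_hB (man power : Int) (l : List Int) :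
    ∀ (i prev : Int), 0 ≤ i - 1 - prev → (i - 1 - prev) + 1 ≤ power →
      gB man power (i - 1 - prev) l = hB man power prev i l := by
  induction l with
  | nil =>
    intro i prev _ h2
    rw [gB, hB]
    simp
    omega
  | cons s t ih =>
    intro i prev h1 h2
    rw [gB, hB]
    by_cases hs : s ≥ man
    · rw [if_pos hs, if_neg (by omega : ¬ s < man)]
      rw [if_neg (by omega : ¬ (0 : Int) + 1 > power)]
      rw [decide_eq_true (by omega : i - prev ≤ power), Bool.true_and]
      have := ih (i + 1) i (by omega) (by omega)
      simpa using this
    · rw [if_neg hs, if_pos (by omega : s < man)]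
      by_cases hp : (i - 1 - prev + 1) + 1 > power
      · rw [if_pos hp, hB_false man power t (i + 1) prev (by omega)]
      · rw [if_neg hp]
        have := ih (i + 1) prev (by omega) (by omega)
        have he : (i + 1) - 1 - prev = i - 1 - prev + 1 := by ring
        rw [he] at this
        exact this

-- ===== VERDICT (by name: the statement is the Claim_ definition above) =====
theorem checkstone_spec : Claim_equal_checkstone := by
  intro man stones power _
  unfold Spec_checkstone checkstone checkstone_alt
  have hA : checkstoneGo man stones power (-1) 0 = gB man power 0 stones := by
    have := go_eq_gB man power stones stones.length 0 (-1) (by omega)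
    simpa using this
  rw [hA]
  cases stones with
  | nil => simp [gB]
  | cons s t =>
    simp only [List.isEmpty_cons, if_neg (by simp : ¬ (false = true))]
    have hpos : ([-1] ++ ((PySem.List.enumerate (s :: t)).filter (fun p => p.2 ≥ man)).map (fun p => p.1)
          ++ [((s :: t).length : Int)])
        = (-1 : Int) :: (safeIdx man 0 (s :: t) ++ [(0 : Int) + (s :: t).length]) := by
      rw [filter_enumerate_eq_safeIdx]
      simp
    show gB man power 0 (s :: t) = allAdj power _
    rw [hpos, allAdj_eq_hB]
    by_cases hp : (1 : Int) ≤ power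
    · have := gB_eq_hB man power (s :: t) 0 (-1) (by omega) (by omega)
      simpa using this
    · -- power ≤ 0: A fails at the first stone, B's first gap is already too large
      rw [gB]
      have hfirst : (if s < man then (0 : Int) + 1 else 0) + 1 > power := by
        by_cases hs : s < man <;> simp [hs] <;> omega
      rw [if_pos hfirst]
      rw [hB]
      by_cases hs : s ≥ man
      · rw [if_pos hs]
        rw [decide_eq_false (by omega : ¬ ((0 : Int) - (-1) ≤ power)), Bool.false_and]
      · rw [if_neg hs]
        rw [hB_false man power t ((0 : Int) + 1) (-1) (by omega)]
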